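-- pv_equiv track=rewrite | github.com/zhangpeng96/PAT | PAT-B/b1055/python-1055.py | row_order
-- ===== SOURCE A (Python) =====
-- def row_order(lst):
--     r = len(lst)
--     if r % 2:
--         data = list(map(lambda x: lst[x],
--             [i for i in range(1, r, 2)] + [i-1 for i in range(r, 0, -2)]))
--     else:
--         data = list(map(lambda x: lst[x],
--             [0] + [i for i in range(2, r, 2)] + [i-1 for i in range(r, 0, -2)]))
--     return data
-- ===== SOURCE B (Python) =====
-- def row_order(lst):
--     r = len(lst)
--     result = [0] * r
--     center = r // 2
--     result[center] = lst[-1]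
--     left, right = center - 1, center + 1
--     go_left = True
--     for i in range(r - 2, -1, -1):
--         if go_left:
--             result[left] = lst[i]
--             left -= 1
--         else:
--             result[right] = lst[i]
--             right += 1
--         go_left = not go_left
--     return result
-- ===== Notes on version B (the rewrite author's own statement) =====
-- stated objective: alternative
-- what changed: B preallocates the output, places the last element at the center, and fills outward with two alternating left/right pointers in one descending pass, instead of building per-parity index lists from range expressions and gathering lst[x] over them.
import Mathlib
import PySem

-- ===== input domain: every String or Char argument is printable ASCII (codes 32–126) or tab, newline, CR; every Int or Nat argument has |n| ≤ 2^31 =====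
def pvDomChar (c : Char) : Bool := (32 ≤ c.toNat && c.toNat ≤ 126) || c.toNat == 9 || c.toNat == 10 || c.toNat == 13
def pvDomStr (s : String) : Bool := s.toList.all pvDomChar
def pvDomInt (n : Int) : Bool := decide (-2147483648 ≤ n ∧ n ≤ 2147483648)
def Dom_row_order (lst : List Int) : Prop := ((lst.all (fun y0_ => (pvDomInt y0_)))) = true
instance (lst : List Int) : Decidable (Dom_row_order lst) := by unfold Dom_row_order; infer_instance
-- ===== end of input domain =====

-- B fills a preallocated result outward from the center with two alternating pointers, instead of building index lists and gathering; same values, a genuinely different traversal (objective: alternative).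

-- ===== PORT A =====
def row_order (lst : List Int) : List Int :=
  let r : Int := PySem.List.len lst
  if PySem.Int.mod r 2 ≠ 0 then
    (PySem.List.pyRange 1 r 2 ++ (PySem.List.pyRange r 0 (-2)).map (fun i => i - 1)).map
      (fun x => PySem.List.pyGetD lst x 0)
  else
    (((0 : Int) :: PySem.List.pyRange 2 r 2) ++ (PySem.List.pyRange r 0 (-2)).map (fun i => i - 1)).map
      (fun x => PySem.List.pyGetD lst x 0)

-- ===== PORT B =====
-- loop body of B: one iteration writes lst[i] at the left or right pointer and flips the side
def rowFill (lst : List Int) (s : List Int × Int × Int × Bool) (i : Int) : List Int × Int × Int × Bool :=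
  match s with
  | (res, left, right, goLeft) =>
    if goLeft then (PySem.List.pySetD res left (PySem.List.pyGetD lst i 0), left - 1, right, !goLeft)
    else (PySem.List.pySetD res right (PySem.List.pyGetD lst i 0), left, right + 1, !goLeft)

def row_order_alt (lst : List Int) : List Int :=
  let r : Int := PySem.List.len lst
  let result : List Int := List.replicate r.toNat 0
  let center : Int := PySem.Int.floordiv r 2
  let result := PySem.List.pySetD result center (PySem.List.pyGetD lst (-1) 0)
  ((PySem.List.pyRange (r - 2) (-1) (-1)).foldl (rowFill lst) (result, center - 1, center + 1, true)).1

-- ===== PRECONDITION & SPEC =====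
-- Pre_ excludes only the empty list, on which A raises IndexError (lst[0] in the even branch; B's lst[-1] raises there too).
def Pre_row_order (lst : List Int) : Prop := lst ≠ []
instance (lst : List Int) : Decidable (Pre_row_order lst) := by unfold Pre_row_order; infer_instance
def pvWitness_row_order : List Int := ([1, 2, 3])

def Spec_row_order (lst : List Int) (out : List Int) : Prop := out = row_order_alt lst
instance (lst : List Int) (out : List Int) : Decidable (Spec_row_order lst out) := by unfold Spec_row_order; infer_instance

-- ===== CLAIM (what is proved, stated in full; the proofs are below) =====
def Claim_equal_row_order : Prop := ∀ (lst : List Int), Dom_row_order lst → Pre_row_order lst → Spec_row_order lst (row_order lst)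

-- ===== LEMMAS AND PROOFS =====

-- the common target: entry j of the output reads lst at this index (c = len/2 is the center)
def specIdx (m j : Nat) : Int :=
  if j < m / 2 then (m : Int) - 2 * (((m / 2 : Nat) : Int) - j)
  else (m : Int) - 1 - 2 * ((j : Int) - ((m / 2 : Nat) : Int))

-- range(a, r, 2)
theorem pyRange_up_two (a r : Int) (c : Nat) (hc : (if a < r then ((r - a + 1) / 2).toNat else 0) = c) :
    PySem.List.pyRange a r 2 = (List.range c).map (fun k : Nat => a + 2 * (k : Int)) := by
  rw [PySem.List.pyRange_of_pos a r (by norm_num)]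
  rw [show r - a + 2 - 1 = r - a + 1 from by ring, hc]

-- range(r, 0, -2)
theorem pyRange_down_two (r : Int) (c : Nat) (hc : (if (0 : Int) < r then ((r + 1) / 2).toNat else 0) = c) :
    PySem.List.pyRange r 0 (-2) = (List.range c).map (fun k : Nat => r - 2 * (k : Int)) := by
  simp only [PySem.List.pyRange]
  norm_num
  rw [show r + 2 - 1 = r + 1 from by ring, hc]
  exact List.map_congr_left fun k _ => by ring

-- writing then reading an in-range cell
theorem getD_pySetD (res : List Int) (l : Int) (v : Int) (h0 : 0 ≤ l) (h1 : l < (res.length : Int))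
    (j : Nat) : (PySem.List.pySetD res l v).getD j 0 = if (j : Int) = l then v else res.getD j 0 := by
  rw [PySem.List.pySetD_of_nonneg res v h0, List.getD_eq_getElem?_getD, List.getElem?_set,
    List.getD_eq_getElem?_getD]
  by_cases h : (j : Int) = l
  · rw [if_pos h, if_pos (by omega), if_pos (by omega)]
    rfl
  · rw [if_neg h, if_neg (by omega)]

-- reading the last element: lst[-1] as a nonnegative index
theorem pyGetD_neg_one_eq (lst : List Int) (h : 0 < lst.length) :
    PySem.List.pyGetD lst (-1) 0 = PySem.List.pyGetD lst ((lst.length - 1 : Nat) : Int) 0 := by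
  rw [show (-1 : Int) = -((1 : Nat) : Int) from by norm_num,
    PySem.List.pyGetD_neg_natCast lst 1 0 (by omega) (by omega),
    PySem.List.pyGetD_natCast, List.getD_eq_getElem _ 0 (by omega)]

-- the two-pointer loop, characterised entrywise: starting at (res, l, rt, g) with n iterations left,
-- it fills ⌈n/2⌉ cells leftward from l and ⌊n/2⌋ rightward from rt (swapped for g = false)
theorem fill_spec (lst : List Int) (n : Nat) :
    ∀ (res : List Int) (l rt : Int) (g : Bool),
    (((if g then (n + 1) / 2 else n / 2 : Nat) : Int)) - 1 ≤ l →
    l < (res.length : Int) → l < rt →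
    rt + ((if g then n / 2 else (n + 1) / 2 : Nat) : Int) ≤ (res.length : Int) →
    (((PySem.List.pyRange ((n : Int) - 1) (-1) (-1)).foldl (rowFill lst) (res, l, rt, g)).1.length
        = res.length) ∧
    ∀ j : Nat, j < res.length →
      ((PySem.List.pyRange ((n : Int) - 1) (-1) (-1)).foldl (rowFill lst) (res, l, rt, g)).1.getD j 0 =
        if l - ((if g then (n + 1) / 2 else n / 2 : Nat) : Int) < (j : Int) ∧ (j : Int) ≤ l then
          PySem.List.pyGetD lst ((n : Int) - (if g then 1 else 2) - 2 * (l - (j : Int))) 0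
        else if rt ≤ (j : Int) ∧ (j : Int) < rt + ((if g then n / 2 else (n + 1) / 2 : Nat) : Int) then
          PySem.List.pyGetD lst ((n : Int) - (if g then 2 else 1) - 2 * ((j : Int) - rt)) 0
        else res.getD j 0 := by
  induction n with
  | zero =>
    intro res l rt g hl hlen hlr hrt
    rw [show ((0 : Nat) : Int) - 1 = -1 from by norm_num,
      PySem.List.pyRange_neg_one_eq_nil (le_refl _)]
    refine ⟨rfl, fun j hj => ?_⟩
    show res.getD j 0 = _
    cases g
    · simp only [Bool.false_eq_true, if_false]
      rw [if_neg (by omega), if_neg (by omega)]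
    · simp only [if_true]
      rw [if_neg (by omega), if_neg (by omega)]
  | succ n ih =>
    intro res l rt g hl hlen hlr hrt
    rw [show ((n + 1 : Nat) : Int) - 1 = (n : Int) from by push_cast; ring,
      PySem.List.pyRange_neg_one_cons (by omega : (-1 : Int) < (n : Int)), List.foldl_cons]
    cases g with
    | true =>
      simp only [if_true] at hl hrt
      have h0l : 0 ≤ l := by omega
      simp only [rowFill, Bool.not_true, if_true]
      obtain ⟨ihlen, ihval⟩ := ih (PySem.List.pySetD res l (PySem.List.pyGetD lst (n : Int) 0)) (l - 1) rt false
        (by simp only [Bool.false_eq_true, if_false]; omega)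
        (by rw [PySem.List.length_pySetD]; omega)
        (by omega)
        (by rw [PySem.List.length_pySetD]; simp only [Bool.false_eq_true, if_false]; omega)
      refine ⟨by rw [ihlen, PySem.List.length_pySetD], fun j hj => ?_⟩
      rw [ihval j (by rw [PySem.List.length_pySetD]; exact hj),
        getD_pySetD res l _ h0l hlen]
      simp only [Bool.false_eq_true, if_false]
      split_ifs <;> first | rfl | (exfalso; omega) | (congr 1; omega)
    | false =>
      simp only [Bool.false_eq_true, if_false] at hl hrt
      have h0rt : 0 ≤ rt := by omega
      have hrtlen : rt < (res.length : Int) := by omega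
      simp only [rowFill, Bool.not_false, Bool.false_eq_true, if_false]
      obtain ⟨ihlen, ihval⟩ := ih (PySem.List.pySetD res rt (PySem.List.pyGetD lst (n : Int) 0)) l (rt + 1) true
        (by simp only [if_true]; omega)
        (by rw [PySem.List.length_pySetD]; omega)
        (by omega)
        (by rw [PySem.List.length_pySetD]; simp only [if_true]; omega)
      refine ⟨by rw [ihlen, PySem.List.length_pySetD], fun j hj => ?_⟩
      rw [ihval j (by rw [PySem.List.length_pySetD]; exact hj),
        getD_pySetD res rt _ h0rt hrtlen]
      simp only [if_true]
      split_ifs <;> first | rfl | (exfalso; omega) | (congr 1; omega)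

-- B computes the map of specIdx
theorem alt_eq_spec (lst : List Int) (h : lst ≠ []) :
    row_order_alt lst = (List.range lst.length).map (fun j => PySem.List.pyGetD lst (specIdx lst.length j) 0) := by
  have hm : 0 < lst.length := List.length_pos_iff.mpr h
  simp only [row_order_alt, PySem.List.len_eq, Int.toNat_natCast]
  rw [show PySem.Int.floordiv (lst.length : Int) 2 = ((lst.length / 2 : Nat) : Int) from by
    exact_mod_cast PySem.Int.floordiv_natCast lst.length 2]
  set m := lst.length with hmdef
  set c : Nat := m / 2 with hcdef
  rw [show (m : Int) - 2 = ((m - 1 : Nat) : Int) - 1 from by omega]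
  have hres0 : (PySem.List.pySetD (List.replicate m (0 : Int)) (c : Int) (PySem.List.pyGetD lst (-1) 0)).length = m := by
    rw [PySem.List.length_pySetD, List.length_replicate]
  obtain ⟨flen, fval⟩ := fill_spec lst (m - 1)
    (PySem.List.pySetD (List.replicate m (0 : Int)) (c : Int) (PySem.List.pyGetD lst (-1) 0))
    ((c : Int) - 1) ((c : Int) + 1) true
    (by simp only [if_true]; omega) (by rw [hres0]; omega) (by omega)
    (by rw [hres0]; simp only [if_true]; omega)
  apply List.ext_getElem
  · rw [flen, hres0, List.length_map, List.length_range]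
  · intro j hj1 hj2
    have hjm : j < m := by rw [flen, hres0] at hj1; exact hj1
    rw [List.getElem_map, List.getElem_range]
    have hF := fval j (by rw [hres0]; exact hjm)
    rw [getD_pySetD _ _ _ (by positivity) (by rw [List.length_replicate]; omega)] at hF
    rw [← List.getD_eq_getElem _ 0 hj1, hF]
    simp only [if_true]
    unfold specIdx
    rw [pyGetD_neg_one_eq lst (by omega)]
    split_ifs <;> (congr 1; omega)

-- A computes the map of specIdx
theorem a_eq_spec (lst : List Int) (h : lst ≠ []) :
    row_order lst = (List.range lst.length).map (fun j => PySem.List.pyGetD lst (specIdx lst.length j) 0) := by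
  have hm : 0 < lst.length := List.length_pos_iff.mpr h
  unfold row_order
  simp only [PySem.List.len_eq]
  set m := lst.length with hmdef
  set c : Nat := m / 2 with hcdef
  have hmod : PySem.Int.mod (m : Int) 2 = ((m % 2 : Nat) : Int) := by
    exact_mod_cast PySem.Int.mod_natCast m 2
  rw [pyRange_down_two (m : Int) ((m + 1) / 2) (by rw [if_pos (by omega : (0:Int) < (m:Int))]; omega)]
  rcases Nat.even_or_odd m with ⟨k, hk⟩ | ⟨k, hk⟩
  · -- even m = 2k, k ≥ 1
    rw [if_neg (by rw [hmod]; omega)]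
    rw [pyRange_up_two 2 (m : Int) (k - 1) (by split_ifs <;> omega)]
    apply List.ext_getElem
    · simp only [List.length_map, List.length_append, List.length_cons, List.length_range]
      omega
    · intro j hj1 hj2
      simp only [List.length_map, List.length_range] at hj2
      simp only [List.getElem_map, List.getElem_range]
      by_cases hjf : j < k
      · rw [List.getElem_append_left (by simp only [List.length_cons, List.length_map, List.length_range]; omega)]
        rcases Nat.eq_zero_or_pos j with hj0 | hj0
        · subst hj0
          simp only [List.getElem_cons_zero]
          unfold specIdx
          rw [if_pos (by omega)]
          congr 1
          omega
        · obtain ⟨j', rfl⟩ : ∃ j', j = j' + 1 := ⟨j - 1, by omega⟩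
          simp only [List.getElem_cons_succ, List.getElem_map, List.getElem_range]
          unfold specIdx
          rw [if_pos (by omega)]
          congr 1
          omega
      · rw [List.getElem_append_right (by simp only [List.length_cons, List.length_map, List.length_range]; omega)]
        simp only [List.length_cons, List.length_map, List.length_range, List.getElem_map,
          List.getElem_range]
        unfold specIdx
        rw [if_neg (by omega)]
        congr 1
        push_cast
        omega
  · -- odd m = 2k + 1
    rw [if_pos (by rw [hmod]; omega)]
    rw [pyRange_up_two 1 (m : Int) k (by split_ifs <;> omega)]
    apply List.ext_getElem
    · simp only [List.length_map, List.length_append, List.length_range]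
      omega
    · intro j hj1 hj2
      simp only [List.length_map, List.length_range] at hj2
      simp only [List.getElem_map, List.getElem_range]
      by_cases hjf : j < k
      · rw [List.getElem_append_left (by simp only [List.length_map, List.length_range]; omega)]
        simp only [List.getElem_map, List.getElem_range]
        unfold specIdx
        rw [if_pos (by omega)]
        congr 1
        omega
      · rw [List.getElem_append_right (by simp only [List.length_map, List.length_range]; omega)]
        simp only [List.length_map, List.length_range, List.getElem_map, List.getElem_range]
        unfold specIdx
        rw [if_neg (by omega)]
        congr 1
        push_cast
        omega

-- ===== VERDICT (by name: the statement is the Claim_ definition above) =====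
theorem row_order_spec : Claim_equal_row_order := by
  intro lst _ hpre
  unfold Spec_row_order
  rw [a_eq_spec lst hpre, alt_eq_spec lst hpre]
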